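-- pv_equiv track=rewrite | github.com/ululam/adventofcode | 2023/3/task3.py | get_adj_numbers_to_position
-- ===== SOURCE A (Python) =====
-- def collect_line_numbers(line: str) -> list((int, int, int)):
--     res, poses, digits = [], [], []
--     for i in range(len(line)):
--         if line[i].isdigit():
--             digits.append(line[i])
--             poses.append(i)
--         elif digits:
--             n = int(''.join(digits))
--             res.append((n, poses[0], poses[-1]))
--             digits, poses = [], []
--     # Don't forget last number in line
--     if digits:
--         n = int(''.join(digits))
--         res.append((n, poses[0], poses[-1]))
--     return res
--
-- def get_adj_numbers_to_position(i: int, lines):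
--     if not lines[0] or not lines[1]:
--         return []
--     res = []
--     # # It's not the time for binary search, ok
--     for line in lines:
--         for n, start, end in collect_line_numbers(line):
--             if i in range(start - 1, end + 2):
--                 res.append(n)
--     return res
-- ===== SOURCE B (Python) =====
-- import re
--
--
-- def get_adj_numbers_to_position(i, lines):
--     if not lines[0] or not lines[1]:
--         return []
--     return [int(m.group())
--             for line in lines
--             for m in re.finditer(r'\d+', line)
--             if m.start() - 1 <= i <= m.end()]
-- ===== Notes on version B (the rewrite author's own statement) =====
-- stated objective: idiomatic
-- what changed: Number extraction is rewritten as regex run-matching (re.finditer(r'\d+')) feeding a single flat comprehension with the half-open span test start-1 <= i <= end, replacing the per-character accumulate/flush scan of collect_line_numbers and its nested append loops.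
import Mathlib
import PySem

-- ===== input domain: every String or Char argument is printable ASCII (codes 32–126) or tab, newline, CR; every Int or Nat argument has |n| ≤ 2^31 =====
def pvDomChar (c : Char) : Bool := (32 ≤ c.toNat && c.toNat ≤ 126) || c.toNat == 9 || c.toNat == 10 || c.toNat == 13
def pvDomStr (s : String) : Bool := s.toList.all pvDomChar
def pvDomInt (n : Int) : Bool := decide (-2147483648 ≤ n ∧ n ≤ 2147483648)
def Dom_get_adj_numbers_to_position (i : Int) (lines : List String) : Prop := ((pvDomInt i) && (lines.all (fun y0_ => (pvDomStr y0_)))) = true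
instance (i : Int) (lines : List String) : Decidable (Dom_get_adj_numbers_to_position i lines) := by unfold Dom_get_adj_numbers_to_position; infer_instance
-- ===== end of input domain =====

-- B extracts numbers as maximal digit runs (regex finditer) filtered by a span test in one flat
-- comprehension, instead of A's per-character accumulate/flush scan; objective: more idiomatic.


-- ===== PORT A =====
-- loop body of collect_line_numbers; state = (res, poses, digits)
def pvStepA (st : List (Int × Int × Int) × List Int × List Char) (ic : Int × Char) :
    List (Int × Int × Int) × List Int × List Char :=
  let (res, poses, digits) := st
  if PySem.Chars.isdigit ic.2 then (res, poses ++ [ic.1], digits ++ [ic.2])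
  else if digits ≠ [] then
    -- n = int(''.join(digits)): digits is a nonempty run of ASCII digits, so int() succeeds; getD 0 unreachable
    (res ++ [((PySem.Int.ofChars? digits).getD 0,
              (PySem.List.pyGet? poses 0).getD 0, (PySem.List.pyGet? poses (-1)).getD 0)], [], [])
  else st

-- 'for i in range(len(line)): … line[i] …' ported as a fold over the enumerated characters
-- (exact: indices 0,1,… in order, each in range)
def collect_line_numbers (line : String) : List (Int × Int × Int) :=
  let st := (PySem.List.enumerate line.toList 0).foldl pvStepA ([], [], [])
  -- Don't forget last number in line
  if st.2.2 ≠ [] then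
    st.1 ++ [((PySem.Int.ofChars? st.2.2).getD 0,
              (PySem.List.pyGet? st.2.1 0).getD 0, (PySem.List.pyGet? st.2.1 (-1)).getD 0)]
  else st.1

def get_adj_numbers_to_position (i : Int) (lines : List String) : List Int :=
  -- 'not lines[0]' / 'not lines[1]': Pre_ guarantees these indexings do not raise; getD "" unreachable
  if (PySem.List.pyGet? lines 0).getD "" = "" then []
  else if (PySem.List.pyGet? lines 1).getD "" = "" then []
  else lines.foldl (fun res line =>
    (collect_line_numbers line).foldl (fun res t =>
      if i ∈ PySem.List.pyRange (t.2.1 - 1) (t.2.2 + 2) 1 then res ++ [t.1] else res) res) []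

-- ===== PORT B =====
-- re.finditer(r'\d+', line): the maximal digit runs, as (int value, start, end-exclusive)
def pvRuns : List Char → Int → List (Int × Int × Int)
  | [], _ => []
  | c :: rest, p =>
    if PySem.Chars.isdigit c then
      let run := (c :: rest).takeWhile PySem.Chars.isdigit
      ((PySem.Int.ofChars? run).getD 0, p, p + (run.length : Int)) ::
        pvRuns ((c :: rest).dropWhile PySem.Chars.isdigit) (p + (run.length : Int))
    else pvRuns rest (p + 1)
  termination_by cs _ => cs.length
  decreasing_by
  · simp only [List.dropWhile_cons, *, if_pos]
    exact Nat.lt_succ_of_le (List.length_dropWhile_le _ _)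
  · simp

def get_adj_numbers_to_position_alt (i : Int) (lines : List String) : List Int :=
  if (PySem.List.pyGet? lines 0).getD "" = "" then []
  else if (PySem.List.pyGet? lines 1).getD "" = "" then []
  else lines.flatMap (fun line =>
    ((pvRuns line.toList 0).filter (fun t => decide (t.2.1 - 1 ≤ i) && decide (i ≤ t.2.2))).map (·.1))

-- ===== PRECONDITION & SPEC =====
-- Pre_ excludes exactly the inputs where A raises IndexError: lines = [] (lines[0]),
-- and a single-element lines whose only line is non-empty (lines[1]; the empty first line
-- short-circuits the guard, so [""] is fine).
def Pre_get_adj_numbers_to_position (i : Int) (lines : List String) : Prop :=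
  2 ≤ lines.length ∨ (lines.length = 1 ∧ lines.headD "" = "")

instance (i : Int) (lines : List String) : Decidable (Pre_get_adj_numbers_to_position i lines) := by
  unfold Pre_get_adj_numbers_to_position; infer_instance

def pvWitness_get_adj_numbers_to_position : Int × List String := (3, ["12..3", "4"])

def Spec_get_adj_numbers_to_position (i : Int) (lines : List String) (out : List Int) : Prop := out = get_adj_numbers_to_position_alt i lines
instance (i : Int) (lines : List String) (out : List Int) : Decidable (Spec_get_adj_numbers_to_position i lines out) := by unfold Spec_get_adj_numbers_to_position; infer_instance

-- ===== CLAIM (what is proved, stated in full; the proofs are below) =====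
def Claim_equal_get_adj_numbers_to_position : Prop := ∀ (i : Int) (lines : List String), Dom_get_adj_numbers_to_position i lines → Pre_get_adj_numbers_to_position i lines → Spec_get_adj_numbers_to_position i lines (get_adj_numbers_to_position i lines)

-- ===== LEMMAS AND PROOFS =====

-- the relation between A's (value, first, last) triples and B's (value, start, end-exclusive) runs
def pvConv (t : Int × Int × Int) : Int × Int × Int := (t.1, t.2.1, t.2.2 - 1)

-- A's flush of the trailing digit run
def pvFinish (st : List (Int × Int × Int) × List Int × List Char) : List (Int × Int × Int) :=
  if st.2.2 ≠ [] then
    st.1 ++ [((PySem.Int.ofChars? st.2.2).getD 0,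
              (PySem.List.pyGet? st.2.1 0).getD 0, (PySem.List.pyGet? st.2.1 (-1)).getD 0)]
  else st.1

theorem pvCollect_eq_finish (line : String) :
    collect_line_numbers line =
      pvFinish ((PySem.List.enumerate line.toList 0).foldl pvStepA ([], [], [])) := rfl

theorem pvRange_get_zero (p : Int) (k : Nat) (hk : 1 ≤ k) :
    (PySem.List.pyGet? (PySem.List.pyRange p (p + k) 1) 0).getD 0 = p := by
  rw [PySem.List.pyRange_one_cons (by omega)]
  simp [PySem.List.pyGet?, PySem.List.pyIdx?]


theorem pvRange_get_last (p : Int) (k : Nat) (hk : 1 ≤ k) :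
    (PySem.List.pyGet? (PySem.List.pyRange p (p + k) 1) (-1)).getD 0 = p + k - 1 := by
  simp only [PySem.List.pyGet?, PySem.List.pyIdx?, PySem.List.length_pyRange_one]
  have hlen : (p + (k : Int) - p).toNat = k := by omega
  rw [hlen, if_neg (by omega : ¬ ((0:Int) ≤ -1)), if_pos (by omega : -(k : Int) ≤ -1)]
  have hone : (-(-1 : Int)).toNat = 1 := rfl
  simp only [hone, Option.bind_some]
  rw [PySem.List.getElem?_pyRange_one, if_pos (by omega)]
  simp only [Option.getD_some]
  omega

theorem pvRun_lemma (ds : List Char) (h : ∀ c ∈ ds, PySem.Chars.isdigit c) :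
    ∀ (p : Int) (res : List (Int × Int × Int)) (poses : List Int) (digits : List Char),
      (PySem.List.enumerate ds p).foldl pvStepA (res, poses, digits) =
        (res, poses ++ PySem.List.pyRange p (p + ds.length) 1, digits ++ ds) := by
  induction ds with
  | nil =>
    intro p res poses digits
    simp only [PySem.List.enumerate_nil, List.foldl_nil, List.length_nil, Nat.cast_zero,
      add_zero]
    rw [PySem.List.pyRange_one_eq_nil le_rfl]
    simp
  | cons c rest ih =>
    intro p res poses digits
    have hc : PySem.Chars.isdigit c := h c (by simp)
    rw [PySem.List.enumerate_cons, List.foldl_cons,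
      show pvStepA (res, poses, digits) (p, c) = (res, poses ++ [p], digits ++ [c]) from by
        simp [pvStepA, hc],
      ih (fun x hx => h x (by simp [hx])) (p + 1) res (poses ++ [p]) (digits ++ [c])]
    have hb : p + ((c :: rest).length : Int) = p + 1 + (rest.length : Int) := by
      push_cast [List.length_cons]; ring
    have hcons : PySem.List.pyRange p (p + 1 + (rest.length : Int)) =
        p :: PySem.List.pyRange (p + 1) (p + 1 + (rest.length : Int)) :=
      PySem.List.pyRange_one_cons (by omega)
    rw [hb, hcons]
    simp [List.append_assoc]

theorem pvMain_lemma : ∀ (n : Nat) (cs : List Char), cs.length = n →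
    ∀ (p : Int) (res : List (Int × Int × Int)),
      pvFinish ((PySem.List.enumerate cs p).foldl pvStepA (res, [], [])) =
        res ++ (pvRuns cs p).map pvConv := by
  intro n
  induction n using Nat.strong_induction_on with
  | _ n ih =>
    intro cs hlen p res
    match cs with
    | [] => simp [PySem.List.enumerate_nil, pvFinish, pvRuns]
    | c :: rest =>
      by_cases hc : PySem.Chars.isdigit c
      · -- a maximal digit run starts here
        obtain ⟨run, hrundef⟩ : ∃ r, r = List.takeWhile PySem.Chars.isdigit (c :: rest) :=
          ⟨_, rfl⟩
        obtain ⟨rest', hrestdef⟩ : ∃ r, r = List.dropWhile PySem.Chars.isdigit (c :: rest) :=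
          ⟨_, rfl⟩
        have hrun : run = c :: rest.takeWhile PySem.Chars.isdigit := by
          rw [hrundef]; simp [hc]
        have hsplit : run ++ rest' = c :: rest := by
          rw [hrundef, hrestdef]; exact List.takeWhile_append_dropWhile
        have hrunlen : 1 ≤ run.length := by rw [hrun]; simp
        have hrunne : run ≠ [] := by rw [hrun]; simp
        have hn : rest.length + 1 = n := by simpa using hlen
        have hlens : run.length + rest'.length = n := by
          have h1 := congrArg List.length hsplit
          simp at h1; omega
        have hdig : ∀ x ∈ run, PySem.Chars.isdigit x := fun x hx =>
          List.mem_takeWhile_imp (hrundef ▸ hx)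
        have hfold : (PySem.List.enumerate (c :: rest) p).foldl pvStepA (res, [], [])
            = (PySem.List.enumerate rest' (p + run.length)).foldl pvStepA
                (res, PySem.List.pyRange p (p + run.length) 1, run) := by
          rw [← hsplit, PySem.List.enumerate_append, List.foldl_append,
            pvRun_lemma run hdig p res [] []]
          simp
        have hruns : pvRuns (c :: rest) p
            = ((PySem.Int.ofChars? run).getD 0, p, p + (run.length : Int)) ::
                pvRuns rest' (p + (run.length : Int)) := by
          rw [pvRuns, if_pos hc, ← hrundef, ← hrestdef]
        cases rest' with
        | nil =>
          rw [hfold, hruns]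
          simp only [PySem.List.enumerate_nil, List.foldl_nil]
          rw [pvFinish.eq_def]
          simp only []
          rw [if_pos (by simpa using hrunne),
            pvRange_get_zero p run.length hrunlen, pvRange_get_last p run.length hrunlen]
          have hnil : pvRuns [] (p + (run.length : Int)) = [] := by rw [pvRuns]
          rw [hnil]
          simp [pvConv]
        | cons d rest'' =>
          have hdd : List.dropWhile PySem.Chars.isdigit (c :: rest) = d :: rest'' :=
            hrestdef.symm
          have hd : PySem.Chars.isdigit d = false := by
            have h2 := List.head?_dropWhile_not PySem.Chars.isdigit (c :: rest)
            rw [hdd] at h2; simpa using h2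
          rw [hfold, PySem.List.enumerate_cons, List.foldl_cons]
          have hstep : pvStepA (res, PySem.List.pyRange p (p + (run.length : Int)) 1, run)
              (p + (run.length : Int), d)
              = (res ++ [((PySem.Int.ofChars? run).getD 0, p, p + (run.length : Int) - 1)],
                 [], []) := by
            simp only [pvStepA]
            rw [if_neg (by simp [hd]), if_pos hrunne,
              pvRange_get_zero p run.length hrunlen, pvRange_get_last p run.length hrunlen]
          rw [hstep,
            ih rest''.length (by simp at hlens; omega) rest'' rfl (p + (run.length : Int) + 1),
            hruns]
          have hruns' : pvRuns (d :: rest'') (p + (run.length : Int))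
              = pvRuns rest'' (p + (run.length : Int) + 1) := by
            rw [pvRuns, if_neg (by simp [hd])]
          rw [hruns']
          simp [pvConv, List.append_assoc]
      · -- non-digit with no pending digits: state unchanged
        have hstep : pvStepA (res, ([] : List Int), ([] : List Char)) (p, c)
            = (res, [], []) := by simp [pvStepA, hc]
        rw [PySem.List.enumerate_cons, List.foldl_cons, hstep,
          ih rest.length (by simp only [List.length_cons] at hlen; omega) rest rfl (p + 1) res]
        have hruns : pvRuns (c :: rest) p = pvRuns rest (p + 1) := by
          rw [pvRuns, if_neg (by simp [hc])]
        rw [hruns]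

theorem pvCollect_eq (line : String) :
    collect_line_numbers line = (pvRuns line.toList 0).map pvConv := by
  rw [pvCollect_eq_finish, pvMain_lemma line.toList.length line.toList rfl 0 []]
  simp

-- ===== VERDICT (by name: the statement is the Claim_ definition above) =====
theorem get_adj_numbers_to_position_spec : Claim_equal_get_adj_numbers_to_position := by
  intro i lines _ _
  unfold Spec_get_adj_numbers_to_position get_adj_numbers_to_position
    get_adj_numbers_to_position_alt
  split_ifs with h1 h2
  · rfl
  · rfl
  · rw [show (fun res line =>
        (collect_line_numbers line).foldl (fun res t =>
          if i ∈ PySem.List.pyRange (t.2.1 - 1) (t.2.2 + 2) 1 then res ++ [t.1] else res) res)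
      = fun (res : List Int) line => res ++
          (((pvRuns line.toList 0).filter
              (fun t => decide (t.2.1 - 1 ≤ i) && decide (i ≤ t.2.2))).map (·.1)) from ?_]
    · rw [PySem.List.foldl_append_eq_flatMap]; simp
    · funext res line
      rw [pvCollect_eq,
        PySem.List.foldl_append_ite (fun t => i ∈ PySem.List.pyRange (t.2.1 - 1) (t.2.2 + 2) 1)
          (fun t => t.1) ((pvRuns line.toList 0).map pvConv) res,
        List.filter_map, List.map_map]
      congr 1
      rw [List.filter_congr (q := fun t => decide (t.2.1 - 1 ≤ i) && decide (i ≤ t.2.2))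
        (fun t _ => by
          simp only [Function.comp, pvConv, PySem.List.mem_pyRange_one]
          by_cases hle : t.2.1 - 1 ≤ i ∧ i ≤ t.2.2
          · rw [decide_eq_true (by omega : t.2.1 - 1 ≤ i ∧ i < t.2.2 - 1 + 2)]
            simp [hle.1, hle.2]
          · rw [decide_eq_false (by omega : ¬(t.2.1 - 1 ≤ i ∧ i < t.2.2 - 1 + 2))]
            rcases not_and_or.mp hle with h | h <;> simp [h]
          )]
      rfl
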